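-- pv_equiv track=rewrite | github.com/fendaq/table_detection | table_detection/table_detection.py | split_by_distance
-- ===== SOURCE A (Python) =====
-- def split_by_distance(compared_list, comparison_key, distance):
--     result = list()
--     temp_list = [compared_list[0]]
--     for item in compared_list[1:]:
--         if item[comparison_key] - temp_list[-1][comparison_key] <= distance:
--             temp_list.append(item)
--         else:
--             result.append(temp_list)
--             temp_list = [item]
--     result.append(temp_list)
--     return result
-- ===== SOURCE B (Python) =====
-- def split_by_distance(compared_list, comparison_key, distance):
--     if not compared_list:
--         raise IndexError("list index out of range")
--     n = len(compared_list)
--     cuts = [0]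
--     for i in range(n - 1):
--         if compared_list[i + 1][comparison_key] - compared_list[i][comparison_key] > distance:
--             cuts.append(i + 1)
--     cuts.append(n)
--     return [compared_list[a:b] for a, b in zip(cuts, cuts[1:])]
-- ===== Notes on version B (the rewrite author's own statement) =====
-- stated objective: alternative
-- what changed: Instead of growing a running temp group and flushing it at each large gap, B scans adjacent index pairs once to collect boundary cut points and then emits the groups as consecutive slices compared_list[a:b].
import Mathlib
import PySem

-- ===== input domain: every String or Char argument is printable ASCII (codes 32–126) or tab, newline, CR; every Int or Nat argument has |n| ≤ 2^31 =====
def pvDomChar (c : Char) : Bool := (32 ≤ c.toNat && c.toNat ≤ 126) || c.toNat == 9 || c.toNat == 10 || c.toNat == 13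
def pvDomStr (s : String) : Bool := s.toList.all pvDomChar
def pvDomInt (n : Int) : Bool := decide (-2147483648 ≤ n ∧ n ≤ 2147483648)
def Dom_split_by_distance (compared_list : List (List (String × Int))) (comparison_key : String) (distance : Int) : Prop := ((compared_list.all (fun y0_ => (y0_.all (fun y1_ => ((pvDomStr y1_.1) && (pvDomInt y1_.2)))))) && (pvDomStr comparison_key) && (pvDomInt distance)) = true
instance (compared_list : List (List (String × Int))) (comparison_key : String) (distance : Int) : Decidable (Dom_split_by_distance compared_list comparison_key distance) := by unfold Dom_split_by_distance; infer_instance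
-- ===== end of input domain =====

-- B replaces A's running temp-group accumulator by a boundary-index scan followed by slicing; alternative decomposition, same cost.


-- shared primitive: item[comparison_key] on a Python dict; the default 0 is never
-- reached inside Pre_ (get? = none is exactly Python's KeyError, excluded there)
def pvItemGet (item : List (String × Int)) (k : String) : Int :=
  ((PySem.Dict.mk item).get? k).getD 0

-- ===== PORT A =====
-- A's loop state: (result, temp_list); temp_list[-1] is pyGetD … (-1)
def pvStepA (comparison_key : String) (distance : Int)
    (st : List (List (List (String × Int))) × List (List (String × Int)))
    (item : List (String × Int)) :
    List (List (List (String × Int))) × List (List (String × Int)) :=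
  if pvItemGet item comparison_key - pvItemGet (PySem.List.pyGetD st.2 (-1) []) comparison_key ≤ distance then
    (st.1, st.2 ++ [item])
  else
    (st.1 ++ [st.2], [item])

def split_by_distance (compared_list : List (List (String × Int))) (comparison_key : String) (distance : Int) : List (List (List (String × Int))) :=
  match compared_list with
  | [] => []  -- Python raises IndexError on compared_list[0]; excluded by Pre_
  | h :: t =>
    let s := (PySem.List.slice (h :: t) (some 1) none).foldl (pvStepA comparison_key distance) ([], [h])
    s.1 ++ [s.2]

-- ===== PORT B =====
def split_by_distance_alt (compared_list : List (List (String × Int))) (comparison_key : String) (distance : Int) : List (List (List (String × Int))) :=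
  match compared_list with
  | [] => []  -- B raises IndexError here too; excluded by Pre_
  | _ :: _ =>
    let n : Int := PySem.List.len compared_list
    let cuts := (PySem.List.pyRange 0 (n - 1) 1).foldl
      (fun acc i =>
        if pvItemGet (PySem.List.pyGetD compared_list (i + 1) []) comparison_key
             - pvItemGet (PySem.List.pyGetD compared_list i []) comparison_key > distance
        then acc ++ [i + 1] else acc)
      [0]
    let cuts2 := cuts ++ [n]
    (cuts2.zip cuts2.tail).map (fun p => PySem.List.slice compared_list (some p.1) (some p.2))

-- ===== PRECONDITION & SPEC =====
-- Pre_ excludes exactly where Python A raises: the empty list (IndexError on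
-- compared_list[0]) and lists of length ≥ 2 with an item lacking comparison_key
-- (KeyError; on a singleton the loop body never runs, so no key is ever looked up).
def Pre_split_by_distance (compared_list : List (List (String × Int))) (comparison_key : String) (distance : Int) : Prop :=
  compared_list ≠ [] ∧
    (compared_list.length ≤ 1 ∨ ∀ item ∈ compared_list, (PySem.Dict.mk item).contains comparison_key = true)
instance (compared_list : List (List (String × Int))) (comparison_key : String) (distance : Int) : Decidable (Pre_split_by_distance compared_list comparison_key distance) := by unfold Pre_split_by_distance; infer_instance

def pvWitness_split_by_distance : (List (List (String × Int))) × String × Int :=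
  ([[("y", 1)], [("y", 3)], [("y", 10)]], "y", 2)

def Spec_split_by_distance (compared_list : List (List (String × Int))) (comparison_key : String) (distance : Int) (out : List (List (List (String × Int)))) : Prop := out = split_by_distance_alt compared_list comparison_key distance
instance (compared_list : List (List (String × Int))) (comparison_key : String) (distance : Int) (out : List (List (List (String × Int)))) : Decidable (Spec_split_by_distance compared_list comparison_key distance out) := by unfold Spec_split_by_distance; infer_instance

-- ===== CLAIM (what is proved, stated in full; the proofs are below) =====
def Claim_equal_split_by_distance : Prop := ∀ (compared_list : List (List (String × Int))) (comparison_key : String) (distance : Int), Dom_split_by_distance compared_list comparison_key distance → Pre_split_by_distance compared_list comparison_key distance → Spec_split_by_distance compared_list comparison_key distance (split_by_distance compared_list comparison_key distance)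

-- ===== LEMMAS AND PROOFS =====

-- reference recursion: pvChop k d x t chops x :: t into maximal runs of adjacent
-- items whose key gap is ≤ d; both ports are proved equal to it.
def pvChop (k : String) (d : Int) : List (String × Int) → List (List (String × Int)) → List (List (List (String × Int)))
  | x, [] => [[x]]
  | x, y :: t =>
    if pvItemGet y k - pvItemGet x k ≤ d then
      match pvChop k d y t with
      | [] => []
      | g :: gs => (x :: g) :: gs
    else [x] :: pvChop k d y t

lemma pvChop_ne_nil (k : String) (d : Int) (x : List (String × Int)) (t : List (List (String × Int))) :
    pvChop k d x t ≠ [] := by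
  induction t generalizing x with
  | nil => simp [pvChop]
  | cons y t ih =>
    simp only [pvChop]
    split_ifs
    · cases h : pvChop k d y t with
      | nil => exact absurd h (ih y)
      | cons g gs => simp
    · simp

-- A's fold, characterised against pvChop
lemma pvFoldA (k : String) (d : Int) (t : List (List (String × Int)))
    (res : List (List (List (String × Int)))) (tl : List (List (String × Int))) (x : List (String × Int)) :
    (let s := t.foldl (pvStepA k d) (res, tl ++ [x]); s.1 ++ [s.2])
      = res ++ (match pvChop k d x t with | [] => [] | g :: gs => (tl ++ g) :: gs) := by
  induction t generalizing res tl x with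
  | nil => simp [pvChop]
  | cons y t ih =>
    simp only [List.foldl_cons, pvStepA, PySem.List.pyGetD_neg_one_append_singleton]
    by_cases h : pvItemGet y k - pvItemGet x k ≤ d
    · rw [if_pos h]
      have := ih res (tl ++ [x]) y
      simp only at this ⊢
      rw [this]
      cases hc : pvChop k d y t with
      | nil => exact absurd hc (pvChop_ne_nil k d y t)
      | cons g gs =>
        simp [pvChop, h, hc, List.append_assoc]
    · rw [if_neg h]
      have := ih (res ++ [tl ++ [x]]) [] y
      simp only [List.nil_append] at this ⊢
      rw [this]
      cases hc : pvChop k d y t with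
      | nil => exact absurd hc (pvChop_ne_nil k d y t)
      | cons g gs =>
        simp [pvChop, h, hc]

lemma pvA_eq_chop (k : String) (d : Int) (h : List (String × Int)) (t : List (List (String × Int))) :
    split_by_distance (h :: t) k d = pvChop k d h t := by
  show (let s := (PySem.List.slice (h :: t) (some 1) none).foldl (pvStepA k d) ([], [h]) ; s.1 ++ [s.2]) = _
  rw [PySem.List.slice_from_one]
  simp only [List.tail_cons]
  have := pvFoldA k d t [] [] h
  simp only [List.nil_append] at this ⊢
  rw [this]
  cases hc : pvChop k d h t with
  | nil => exact absurd hc (pvChop_ne_nil k d h t)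
  | cons g gs => simp

-- B in Nat form
def pvBrkN (k : String) (d : Int) (cl : List (List (String × Int))) (i : Nat) : Bool :=
  decide (pvItemGet (cl.getD (i + 1) []) k - pvItemGet (cl.getD i []) k > d)

def pvCutsN (k : String) (d : Int) (cl : List (List (String × Int))) : List Nat :=
  0 :: (((List.range (cl.length - 1)).filter (pvBrkN k d cl)).map (· + 1) ++ [cl.length])

def pvSliceN (cl : List (List (String × Int))) (a b : Nat) : List (List (String × Int)) :=
  (cl.drop a).take (b - a)

def pvSlicesN (cl : List (List (String × Int))) (cs : List Nat) : List (List (List (String × Int))) :=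
  (cs.zip cs.tail).map (fun p => pvSliceN cl p.1 p.2)

lemma pvB_natform (k : String) (d : Int) (h : List (String × Int)) (t : List (List (String × Int))) :
    split_by_distance_alt (h :: t) k d = pvSlicesN (h :: t) (pvCutsN k d (h :: t)) := by
  simp only [split_by_distance_alt, PySem.List.len_eq]
  have hcut :
      ((PySem.List.pyRange 0 (((h :: t).length : Int) - 1) 1).foldl
          (fun acc i =>
            if pvItemGet (PySem.List.pyGetD (h :: t) (i + 1) []) k
                 - pvItemGet (PySem.List.pyGetD (h :: t) i []) k > d
            then acc ++ [i + 1] else acc)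
          [0]) ++ [((h :: t).length : Int)]
        = (pvCutsN k d (h :: t)).map (fun n : Nat => (n : Int)) := by
    have hfun :
        (fun (acc : List Int) (i : Int) =>
            if pvItemGet (PySem.List.pyGetD (h :: t) (i + 1) []) k
                 - pvItemGet (PySem.List.pyGetD (h :: t) i []) k > d
            then acc ++ [i + 1] else acc)
          = (fun (acc : List Int) (i : Int) =>
            if (fun j : Int => decide (pvItemGet (PySem.List.pyGetD (h :: t) (j + 1) []) k
                 - pvItemGet (PySem.List.pyGetD (h :: t) j []) k > d)) i
            then acc ++ [i + 1] else acc) := by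
      funext acc i; simp
    rw [hfun, PySem.List.foldl_append_if]
    have hrange : PySem.List.pyRange 0 (((h :: t).length : Int) - 1) 1
        = (List.range t.length).map (fun n : Nat => (n : Int)) := by
      rw [PySem.List.pyRange_one]
      simp
    rw [hrange, List.filter_map]
    have hp : ((fun j : Int => decide (pvItemGet (PySem.List.pyGetD (h :: t) (j + 1) []) k
                 - pvItemGet (PySem.List.pyGetD (h :: t) j []) k > d)) ∘ (fun n : Nat => (n : Int)))
        = pvBrkN k d (h :: t) := by
      funext i
      simp only [Function.comp_apply, pvBrkN]
      rw [show ((i : Int) + 1) = ((i + 1 : Nat) : Int) by push_cast; ring]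
      simp only [PySem.List.pyGetD_natCast]
    rw [hp]
    unfold pvCutsN
    simp [List.map_map, Function.comp]
  rw [hcut, ← List.map_tail, List.zip_map, List.map_map]
  unfold pvSlicesN pvSliceN
  refine List.map_congr_left ?_
  intro p _
  simp [Prod.map, PySem.List.slice_natCast]

lemma pvSlicesN_shift (x : List (String × Int)) (cl : List (List (String × Int))) (cs : List Nat) :
    pvSlicesN (x :: cl) (cs.map (· + 1)) = pvSlicesN cl cs := by
  unfold pvSlicesN
  rw [← List.map_tail, List.zip_map, List.map_map]
  refine List.map_congr_left ?_
  intro p _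
  simp [pvSliceN, Prod.map]

lemma pvSlicesN_cons₂ (cl : List (List (String × Int))) (a b : Nat) (rest : List Nat) :
    pvSlicesN cl (a :: b :: rest) = pvSliceN cl a b :: pvSlicesN cl (b :: rest) := by
  simp [pvSlicesN]

lemma pvB_eq_chop (k : String) (d : Int) (x : List (String × Int)) (t : List (List (String × Int))) :
    pvSlicesN (x :: t) (pvCutsN k d (x :: t)) = pvChop k d x t := by
  induction t generalizing x with
  | nil => simp [pvCutsN, pvSlicesN, pvSliceN, pvChop]
  | cons y t ih =>
    have hb : ∀ i, pvBrkN k d (x :: y :: t) (i + 1) = pvBrkN k d (y :: t) i := by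
      intro i
      simp [pvBrkN]
    have hfil : (List.range (t.length + 1)).filter (pvBrkN k d (x :: y :: t))
        = (if pvBrkN k d (x :: y :: t) 0 then [0] else [])
            ++ ((List.range t.length).filter (pvBrkN k d (y :: t))).map (· + 1) := by
      rw [List.range_succ_eq_map, List.filter_cons, List.filter_map]
      have hcomp : pvBrkN k d (x :: y :: t) ∘ Nat.succ = pvBrkN k d (y :: t) := by
        funext i
        simpa [Nat.succ_eq_add_one] using hb i
      rw [hcomp]
      split_ifs <;> simp
    have htc : pvCutsN k d (y :: t)
        = 0 :: (((List.range t.length).filter (pvBrkN k d (y :: t))).map (· + 1) ++ [t.length + 1]) := rfl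
    by_cases h0 : pvItemGet y k - pvItemGet x k ≤ d
    · -- close: no break at 0
      have hbrk0 : pvBrkN k d (x :: y :: t) 0 = false := by
        simp only [pvBrkN, List.getD_cons_succ, List.getD_cons_zero, decide_eq_false_iff_not]
        omega
      have hcuts : pvCutsN k d (x :: y :: t)
          = 0 :: ((((List.range t.length).filter (pvBrkN k d (y :: t))).map (· + 1)
              ++ [t.length + 1]).map (· + 1)) := by
        unfold pvCutsN
        simp only [List.length_cons]
        rw [show t.length + 1 + 1 - 1 = t.length + 1 by omega, hfil, hbrk0]
        simp [List.map_map]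
      obtain ⟨c, tc', htc'⟩ :
          ∃ c tc', ((List.range t.length).filter (pvBrkN k d (y :: t))).map (· + 1)
              ++ [t.length + 1] = c :: tc' := by
        cases hcase : ((List.range t.length).filter (pvBrkN k d (y :: t))).map (· + 1) with
        | nil => exact ⟨t.length + 1, [], by simp⟩
        | cons a l => exact ⟨a, l ++ [t.length + 1], by simp⟩
      have hIH := ih y
      rw [htc, htc', pvSlicesN_cons₂] at hIH
      rw [hcuts, htc', List.map_cons, pvSlicesN_cons₂]
      have hshift : pvSlicesN (x :: y :: t) ((c + 1) :: tc'.map (· + 1))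
          = pvSlicesN (y :: t) (c :: tc') := by
        have := pvSlicesN_shift x (y :: t) (c :: tc')
        simpa using this
      rw [hshift]
      have hslice : pvSliceN (x :: y :: t) 0 (c + 1) = x :: pvSliceN (y :: t) 0 c := by
        simp [pvSliceN]
      rw [hslice]
      simp only [pvChop, if_pos h0]
      cases hg : pvChop k d y t with
      | nil => exact absurd hg (pvChop_ne_nil k d y t)
      | cons g gs =>
        rw [hg] at hIH
        obtain ⟨h1, h2⟩ := List.cons.injEq .. ▸ hIH
        rw [h1, h2]
    · -- far: break at 0
      have hbrk0 : pvBrkN k d (x :: y :: t) 0 = true := by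
        simp only [pvBrkN, List.getD_cons_succ, List.getD_cons_zero, decide_eq_true_eq]
        omega
      have hcuts : pvCutsN k d (x :: y :: t)
          = 0 :: 1 :: ((((List.range t.length).filter (pvBrkN k d (y :: t))).map (· + 1)
              ++ [t.length + 1]).map (· + 1)) := by
        unfold pvCutsN
        simp only [List.length_cons]
        rw [show t.length + 1 + 1 - 1 = t.length + 1 by omega, hfil, hbrk0]
        simp [List.map_map]
      rw [hcuts, pvSlicesN_cons₂]
      have hone : (1 : Nat) :: ((((List.range t.length).filter (pvBrkN k d (y :: t))).map (· + 1)
              ++ [t.length + 1]).map (· + 1))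
          = ((0 :: (((List.range t.length).filter (pvBrkN k d (y :: t))).map (· + 1)
              ++ [t.length + 1])).map (· + 1)) := by
        simp
      rw [hone, pvSlicesN_shift, ← htc, ih y]
      have hslice : pvSliceN (x :: y :: t) 0 1 = [x] := by
        simp [pvSliceN]
      rw [hslice]
      simp [pvChop, h0]

-- ===== VERDICT (by name: the statement is the Claim_ definition above) =====
theorem split_by_distance_spec : Claim_equal_split_by_distance := by
  intro cl k d _ hpre
  unfold Spec_split_by_distance
  match cl, hpre with
  | h :: t, _ =>
    rw [pvA_eq_chop, pvB_natform, pvB_eq_chop]
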